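-- pv_equiv track=rewrite | github.com/dominic-fischer/unify-language-data | testing_validation/_validate_grammar.py | _insert_commas_in_flow_sequences
-- ===== SOURCE A (Python) =====
-- def _insert_commas_in_flow_sequences(text: str) -> str:
--     """
--     Repair common YAML flow sequence errors like:
--       [a b c] -> [a, b, c]
--
--     Conservative:
--     - Only inside [...]
--     - Skips quoted strings
--     """
--     out = []
--     in_brackets = 0
--     in_squote = False
--     in_dquote = False
--     prev_nonspace = ""
--
--     i = 0
--     while i < len(text):
--         ch = text[i]
--
--         if in_brackets > 0:
--             if ch == "'" and not in_dquote:
--                 in_squote = not in_squote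
--             elif ch == '"' and not in_squote:
--                 in_dquote = not in_dquote
--
--         if not in_squote and not in_dquote:
--             if ch == "[":
--                 in_brackets += 1
--                 prev_nonspace = "["
--                 out.append(ch)
--                 i += 1
--                 continue
--             if ch == "]" and in_brackets > 0:
--                 in_brackets -= 1
--                 prev_nonspace = "]"
--                 out.append(ch)
--                 i += 1
--                 continue
--
--         if in_brackets > 0 and not in_squote and not in_dquote:
--             if ch.isspace():
--                 j = i
--                 while j < len(text) and text[j].isspace():
--                     j += 1
--                 if j < len(text):
--                     nxt = text[j]
--                     if prev_nonspace and prev_nonspace not in "[," and nxt not in "],":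
--                         out.append(",")
--                         prev_nonspace = ","
--                 out.append(ch)
--                 i += 1
--                 continue
--
--         out.append(ch)
--         if not ch.isspace():
--             prev_nonspace = ch
--         i += 1
--
--     return "".join(out)
-- ===== SOURCE B (Python) =====
-- def _insert_commas_in_flow_sequences(text: str) -> str:
--     """Same repair as A, but one pass with a deferred (pending-whitespace) buffer
--     instead of an inner look-ahead scan."""
--     out = []
--     in_brackets = 0
--     in_squote = False
--     in_dquote = False
--     prev_nonspace = ""
--     pending = []  # buffered whitespace seen inside brackets, comma decision deferred
--
--     def flush(nxt):
--         # emit the deferred comma (if due) and the buffered whitespace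
--         if pending and prev_nonspace and prev_nonspace not in "[," and nxt not in "],":
--             out.append(",")
--         out.extend(pending)
--         pending.clear()
--
--     for ch in text:
--         if in_brackets > 0:
--             if ch == "'" and not in_dquote:
--                 in_squote = not in_squote
--             elif ch == '"' and not in_squote:
--                 in_dquote = not in_dquote
--
--         if not in_squote and not in_dquote:
--             if ch == "[":
--                 flush(ch)
--                 in_brackets += 1
--                 prev_nonspace = "["
--                 out.append(ch)
--                 continue
--             if ch == "]" and in_brackets > 0:
--                 flush(ch)
--                 in_brackets -= 1
--                 prev_nonspace = "]"
--                 out.append(ch)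
--                 continue
--
--         if in_brackets > 0 and not in_squote and not in_dquote and ch.isspace():
--             pending.append(ch)
--             continue
--
--         flush(ch)
--         out.append(ch)
--         if not ch.isspace():
--             prev_nonspace = ch
--     out.extend(pending)  # end of text: no comma
--     return "".join(out)
-- ===== Notes on version B (the rewrite author's own statement) =====
-- stated objective: alternative
-- what changed: Replaces A's inner look-ahead loop that rescans the whitespace run at every space with a deferred pending-whitespace buffer: the comma decision is made once, when the next non-space character arrives, so the text is traversed exactly once.
import Mathlib
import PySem

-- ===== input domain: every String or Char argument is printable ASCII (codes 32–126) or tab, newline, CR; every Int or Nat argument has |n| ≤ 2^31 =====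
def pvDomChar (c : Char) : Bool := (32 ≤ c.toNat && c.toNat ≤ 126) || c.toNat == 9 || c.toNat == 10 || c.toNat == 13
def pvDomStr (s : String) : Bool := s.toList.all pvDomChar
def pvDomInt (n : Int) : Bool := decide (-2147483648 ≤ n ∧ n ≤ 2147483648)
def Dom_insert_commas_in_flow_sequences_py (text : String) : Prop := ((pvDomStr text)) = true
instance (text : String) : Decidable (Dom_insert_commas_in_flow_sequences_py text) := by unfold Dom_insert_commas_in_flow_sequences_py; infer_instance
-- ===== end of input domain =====

-- B replaces A's inner whitespace look-ahead scan by a deferred pending-whitespace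
-- buffer, deciding the comma when the next non-space character arrives (objective:
-- alternative single-pass decomposition, no rescanning).

-- quote-state update (the identical two-line toggle both Python versions perform)
def pvToggle (inb : Nat) (sq dq : Bool) (ch : Char) : Bool × Bool :=
  if inb > 0 then
    if ch == '\'' && !dq then (!sq, dq)
    else if ch == '"' && !sq then (sq, !dq)
    else (sq, dq)
  else (sq, dq)

-- ===== PORT A =====
-- inner loop: j = i; while j < len(text) and text[j].isspace(): j += 1 ; nxt = text[j] if j < len
def pvNextNonspaceA : List Char → Option Char
  | [] => none
  | c :: rest => if PySem.Chars.isspace c then pvNextNonspaceA rest else some c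

def pvLoopA : List Char → Nat → Bool → Bool → Option Char → List Char → List Char
  | [], _, _, _, _, out => out
  | ch :: rest, inb, sq, dq, prev, out =>
    let st := pvToggle inb sq dq ch
    let sq' := st.1
    let dq' := st.2
    if !sq' && !dq' && ch == '[' then
      pvLoopA rest (inb + 1) sq' dq' (some '[') (out ++ [ch])
    else if !sq' && !dq' && ch == ']' && inb > 0 then
      pvLoopA rest (inb - 1) sq' dq' (some ']') (out ++ [ch])
    else if inb > 0 && !sq' && !dq' && PySem.Chars.isspace ch then
      match pvNextNonspaceA (ch :: rest) with
      | some nxt =>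
        if (match prev with | none => false | some p => !(p == '[' || p == ',')) &&
            !(nxt == ']' || nxt == ',') then
          pvLoopA rest inb sq' dq' (some ',') (out ++ [','] ++ [ch])
        else
          pvLoopA rest inb sq' dq' prev (out ++ [ch])
      | none => pvLoopA rest inb sq' dq' prev (out ++ [ch])
    else
      pvLoopA rest inb sq' dq' (if PySem.Chars.isspace ch then prev else some ch) (out ++ [ch])

def insert_commas_in_flow_sequences_py (text : String) : String :=
  String.ofList (pvLoopA text.toList 0 false false none [])

-- ===== PORT B =====
-- flush(nxt): emit the deferred comma (if due) and the buffered whitespace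
def pvFlushB (prev : Option Char) (pending : List Char) (ch : Char) : List Char :=
  (if !pending.isEmpty &&
      (match prev with | none => false | some p => !(p == '[' || p == ',')) &&
      !(ch == ']' || ch == ',') then [','] else []) ++ pending

def pvLoopB : List Char → Nat → Bool → Bool → Option Char → List Char → List Char → List Char
  | [], _, _, _, _, pending, out => out ++ pending
  | ch :: rest, inb, sq, dq, prev, pending, out =>
    let st := pvToggle inb sq dq ch
    let sq' := st.1
    let dq' := st.2
    if !sq' && !dq' && ch == '[' then
      pvLoopB rest (inb + 1) sq' dq' (some '[') [] (out ++ pvFlushB prev pending ch ++ [ch])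
    else if !sq' && !dq' && ch == ']' && inb > 0 then
      pvLoopB rest (inb - 1) sq' dq' (some ']') [] (out ++ pvFlushB prev pending ch ++ [ch])
    else if inb > 0 && !sq' && !dq' && PySem.Chars.isspace ch then
      pvLoopB rest inb sq' dq' prev (pending ++ [ch]) out
    else
      pvLoopB rest inb sq' dq' (if PySem.Chars.isspace ch then prev else some ch) []
        (out ++ pvFlushB prev pending ch ++ [ch])

def insert_commas_in_flow_sequences_py_alt (text : String) : String :=
  String.ofList (pvLoopB text.toList 0 false false none [] [])

-- ===== PRECONDITION & SPEC =====
def Spec_insert_commas_in_flow_sequences_py (text : String) (out : String) : Prop := out = insert_commas_in_flow_sequences_py_alt text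
instance (text : String) (out : String) : Decidable (Spec_insert_commas_in_flow_sequences_py text out) := by unfold Spec_insert_commas_in_flow_sequences_py; infer_instance

-- ===== CLAIM (what is proved, stated in full; the proofs are below) =====
def Claim_equal_insert_commas_in_flow_sequences_py : Prop := ∀ (text : String), Dom_insert_commas_in_flow_sequences_py text → Spec_insert_commas_in_flow_sequences_py text (insert_commas_in_flow_sequences_py text)

-- ===== LEMMAS AND PROOFS =====

-- the comma A commits at the first space of a run, read off prev and the next non-space char
def pvCond (prev : Option Char) (n? : Option Char) : Bool :=
  match n? with
  | none => false
  | some n =>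
    (match prev with | none => false | some p => !(p == '[' || p == ',')) &&
      !(n == ']' || n == ',')

-- a whitespace character is none of the four structural characters
theorem pvSpaceFacts (c : Char) (h : PySem.Chars.isspace c = true) :
    (c == '\'') = false ∧ (c == '"') = false ∧ (c == '[') = false ∧ (c == ']') = false := by
  simp [PySem.Chars.isspace] at h
  refine ⟨?_, ?_, ?_, ?_⟩ <;>
  · simp only [beq_eq_false_iff_ne, ne_eq]
    rintro rfl
    exact absurd h (by decide)

theorem pvToggle_space (inb : Nat) (ch : Char) (h : PySem.Chars.isspace ch = true) :
    pvToggle inb false false ch = (false, false) := by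
  obtain ⟨h1, h2, -, -⟩ := pvSpaceFacts ch h
  simp [pvToggle, h1, h2]

theorem pvFlushB_nil (prev : Option Char) (ch : Char) : pvFlushB prev [] ch = [] := by
  simp [pvFlushB]

theorem pvCond_eq (prev : Option Char) (nxt : Char) :
    ((match prev with | none => false | some p => !(p == '[' || p == ',')) &&
      !(nxt == ']' || nxt == ',')) = pvCond prev (some nxt) := rfl

theorem pvFlushB_eq (prev : Option Char) (pending : List Char) (ch : Char)
    (hpe : pending.isEmpty = false) :
    pvFlushB prev pending ch = (if pvCond prev (some ch) then [','] else []) ++ pending := by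
  cases prev <;> simp [pvFlushB, pvCond, hpe]

-- Invariant: with an empty buffer B's state mirrors A's exactly; with a non-empty
-- buffer (only reachable inside brackets, outside quotes) A is ahead of B by the
-- already-committed optional comma plus the buffered whitespace.
theorem pvKey : ∀ (cs : List Char),
    (∀ (inb : Nat) (sq dq : Bool) (prev : Option Char) (out : List Char),
      pvLoopA cs inb sq dq prev out = pvLoopB cs inb sq dq prev [] out) ∧
    (∀ (inb : Nat) (prev : Option Char) (pending out : List Char),
      pending ≠ [] → 0 < inb →
      pvLoopA cs inb false false
          (if pvCond prev (pvNextNonspaceA cs) then some ',' else prev)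
          (out ++ (if pvCond prev (pvNextNonspaceA cs) then [','] else []) ++ pending)
        = pvLoopB cs inb false false prev pending out) := by
  intro cs
  induction cs with
  | nil =>
      constructor
      · intro inb sq dq prev out
        simp [pvLoopA, pvLoopB]
      · intro inb prev pending out _ _
        simp [pvLoopA, pvLoopB, pvNextNonspaceA, pvCond]
  | cons ch rest ih =>
      obtain ⟨ih1, ih2⟩ := ih
      constructor
      · -- empty buffer: the two loops march in lock step
        intro inb sq dq prev out
        rcases hst : pvToggle inb sq dq ch with ⟨sq', dq'⟩
        simp only [pvLoopA, pvLoopB, hst]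
        by_cases h1 : (!sq' && !dq' && (ch == '[')) = true
        · rw [if_pos h1, if_pos h1, pvFlushB_nil]
          rw [ih1]
          simp
        · rw [if_neg h1, if_neg h1]
          by_cases h2 : (!sq' && !dq' && (ch == ']') && decide (inb > 0)) = true
          · rw [if_pos h2, if_pos h2, pvFlushB_nil]
            rw [ih1]
            simp
          · rw [if_neg h2, if_neg h2]
            by_cases h3 : (decide (inb > 0) && !sq' && !dq' && PySem.Chars.isspace ch) = true
            · rw [if_pos h3, if_pos h3]
              have h3' := h3
              simp only [Bool.and_eq_true, decide_eq_true_eq, Bool.not_eq_true'] at h3'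
              obtain ⟨⟨⟨hinb, hsq⟩, hdq⟩, hsp⟩ := h3'
              subst hsq; subst hdq
              have hNN : pvNextNonspaceA (ch :: rest) = pvNextNonspaceA rest := by
                simp [pvNextNonspaceA, hsp]
              rw [hNN]
              have hB := ih2 inb prev [ch] out (by simp) hinb
              rcases hn : pvNextNonspaceA rest with _ | nxt
              · rw [hn] at hB
                have hc0 : pvCond prev none = false := rfl
                rw [hc0] at hB
                dsimp only
                simpa using hB
              · rw [hn] at hB
                dsimp only
                rw [pvCond_eq]
                cases hc : pvCond prev (some nxt) with
                | true =>
                    rw [hc] at hB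
                    simpa using hB
                | false =>
                    rw [hc] at hB
                    simpa using hB
            · rw [if_neg h3, if_neg h3, pvFlushB_nil]
              rw [ih1]
              simp
      · -- non-empty buffer: A already emitted the committed comma and the whitespace
        intro inb prev pending out hp hinb
        have hpe : pending.isEmpty = false := by simpa [List.isEmpty_iff] using hp
        by_cases hsp : PySem.Chars.isspace ch = true
        · -- another whitespace character: B buffers it, A appends it with no new comma
          obtain ⟨hq1, hq2, hq3, hq4⟩ := pvSpaceFacts ch hsp
          have hNN : pvNextNonspaceA (ch :: rest) = pvNextNonspaceA rest := by
            simp [pvNextNonspaceA, hsp]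
          rw [hNN]
          simp only [pvLoopA, pvLoopB, pvToggle_space inb ch hsp]
          have n1 : ch ≠ '[' := by simpa using hq3
          have n2 : ch ≠ ']' := by simpa using hq4
          have c1 : ¬ (!false && !false && (ch == '[')) = true := by simp [n1]
          have c2 : ¬ (!false && !false && (ch == ']') && decide (inb > 0)) = true := by
            simp [n2]
          have c3 : (decide (inb > 0) && !false && !false && PySem.Chars.isspace ch) = true := by
            simp [hinb, hsp]
          rw [if_neg c1, if_neg c1, if_neg c2, if_neg c2, if_pos c3, if_pos c3]
          rw [hNN]
          have hB := ih2 inb prev (pending ++ [ch]) out (by simp) hinb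
          rcases hn : pvNextNonspaceA rest with _ | nxt
          · rw [hn] at hB
            have hc0 : pvCond prev none = false := rfl
            rw [hc0] at hB ⊢
            dsimp only
            simpa using hB
          · rw [hn] at hB
            dsimp only
            cases hc : pvCond prev (some nxt) with
            | true =>
                rw [hc] at hB
                rw [pvCond_eq]
                have hcc : pvCond (some ',') (some nxt) = false := by
                  simp [pvCond]
                simp only [if_true] at hB ⊢
                rw [hcc]
                simpa using hB
            | false =>
                rw [hc] at hB
                rw [pvCond_eq]
                simp only [Bool.false_eq_true, if_false] at hB ⊢
                rw [hc]
                simpa using hB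
        · -- the next non-space character arrives: B flushes, matching A's committed comma
          have hNN : pvNextNonspaceA (ch :: rest) = some ch := by
            simp [pvNextNonspaceA, hsp]
          rw [hNN]
          rcases hst : pvToggle inb false false ch with ⟨sq', dq'⟩
          simp only [pvLoopA, pvLoopB, hst]
          rw [pvFlushB_eq prev pending ch hpe]
          cases hc : pvCond prev (some ch) with
          | true =>
              simp only [if_true]
              by_cases h1 : (!sq' && !dq' && (ch == '[')) = true
              · rw [if_pos h1, if_pos h1]
                rw [ih1]
                simp
              · rw [if_neg h1, if_neg h1]
                by_cases h2 : (!sq' && !dq' && (ch == ']') && decide (inb > 0)) = true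
                · rw [if_pos h2, if_pos h2]
                  rw [ih1]
                  simp
                · rw [if_neg h2, if_neg h2]
                  have c3' : ¬ (decide (inb > 0) && !sq' && !dq' && PySem.Chars.isspace ch) = true := by
                    simp [hsp]
                  rw [if_neg c3', if_neg c3']
                  rw [ih1]
                  simp [hsp]
          | false =>
              simp only [Bool.false_eq_true, if_false]
              by_cases h1 : (!sq' && !dq' && (ch == '[')) = true
              · rw [if_pos h1, if_pos h1]
                rw [ih1]
                simp
              · rw [if_neg h1, if_neg h1]
                by_cases h2 : (!sq' && !dq' && (ch == ']') && decide (inb > 0)) = true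
                · rw [if_pos h2, if_pos h2]
                  rw [ih1]
                  simp
                · rw [if_neg h2, if_neg h2]
                  have c3' : ¬ (decide (inb > 0) && !sq' && !dq' && PySem.Chars.isspace ch) = true := by
                    simp [hsp]
                  rw [if_neg c3', if_neg c3']
                  rw [ih1]
                  simp [hsp]

theorem insert_commas_in_flow_sequences_py_spec : Claim_equal_insert_commas_in_flow_sequences_py := by
  intro text _
  unfold Spec_insert_commas_in_flow_sequences_py
  unfold insert_commas_in_flow_sequences_py insert_commas_in_flow_sequences_py_alt
  rw [(pvKey text.toList).1]
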